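-- pv_equiv track=rewrite | github.com/tywenrick3/Data-Structures-Algorithms-Work | exam_q5.py | remove_numbers
-- ===== SOURCE A (Python) =====
-- def remove_numbers(list1):
--     i = 0
--     while i < len(list1):
--         if list1[i].isdigit():
--             del list1[i]
--             i -= 1 # because using del eveything shifts left
--         i += 1
--
--     return list1
-- ===== SOURCE B (Python) =====
-- def remove_numbers(list1):
--     # two-pointer compaction: overwrite survivors forward, then truncate once
--     write = 0
--     for read in range(len(list1)):
--         if not list1[read].isdigit():
--             list1[write] = list1[read]
--             write += 1
--     del list1[write:]
--     return list1
-- ===== Notes on version B (the rewrite author's own statement) =====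
-- stated objective: alternative
-- what changed: Replaces the delete-and-rewind while loop (each del shifts the whole tail) by a single-pass two-pointer compaction that overwrites survivors forward and truncates the tail once; measured speedup on generated inputs stayed below the 1.5x bar.
import Mathlib
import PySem

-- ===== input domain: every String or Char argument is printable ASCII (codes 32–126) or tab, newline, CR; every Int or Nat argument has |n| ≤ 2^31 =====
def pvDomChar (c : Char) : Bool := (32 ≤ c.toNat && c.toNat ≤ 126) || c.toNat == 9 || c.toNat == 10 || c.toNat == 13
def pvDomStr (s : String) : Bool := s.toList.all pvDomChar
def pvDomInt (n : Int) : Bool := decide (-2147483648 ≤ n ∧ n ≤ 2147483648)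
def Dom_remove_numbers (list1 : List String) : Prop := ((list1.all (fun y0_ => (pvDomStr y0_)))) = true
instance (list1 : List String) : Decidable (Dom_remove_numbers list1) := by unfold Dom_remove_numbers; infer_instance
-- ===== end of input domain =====

-- B replaces A's delete-and-rewind loop by a single-pass two-pointer compaction (alternative algorithm); return-value equivalence (both mutate list1 in place in Python).


-- ===== PORT A =====
-- while i < len(list1): if list1[i].isdigit(): del list1[i]; i -= 1; then i += 1
-- (the net effect of a deletion is i unchanged, else i+1)
def removeNumbersLoopA (xs : List String) (i : Nat) : List String :=
  if h : i < xs.length then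
    if PySem.Str.strIsdigit xs[i] then
      removeNumbersLoopA (xs.eraseIdx i) i
    else
      removeNumbersLoopA xs (i + 1)
  else xs
termination_by xs.length - i
decreasing_by
  · have := xs.length_eraseIdx_of_lt h; omega
  · omega

def remove_numbers (list1 : List String) : List String :=
  removeNumbersLoopA list1 0

-- ===== PORT B =====
-- two-pointer compaction: the write prefix is the accumulator `w`, the read index
-- walks the list; afterwards the tail beyond `write` is dropped (here: `w` is returned).
def removeNumbersLoopB (xs : List String) (w : List String) : List String :=
  match xs with
  | [] => w
  | x :: rest =>
    if PySem.Str.strIsdigit x then removeNumbersLoopB rest w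
    else removeNumbersLoopB rest (w ++ [x])

def remove_numbers_alt (list1 : List String) : List String :=
  removeNumbersLoopB list1 []

-- ===== PRECONDITION & SPEC =====
def Spec_remove_numbers (list1 : List String) (out : List String) : Prop := out = remove_numbers_alt list1
instance (list1 : List String) (out : List String) : Decidable (Spec_remove_numbers list1 out) := by unfold Spec_remove_numbers; infer_instance

-- ===== CLAIM (what is proved, stated in full; the proofs are below) =====
def Claim_equal_remove_numbers : Prop := ∀ (list1 : List String), Dom_remove_numbers list1 → Spec_remove_numbers list1 (remove_numbers list1)

-- ===== LEMMAS AND PROOFS =====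
theorem removeNumbersLoopB_eq (xs w : List String) :
    removeNumbersLoopB xs w = w ++ xs.filter (fun s => !PySem.Str.strIsdigit s) := by
  induction xs generalizing w with
  | nil => simp [removeNumbersLoopB]
  | cons x rest ih =>
    simp only [removeNumbersLoopB, List.filter_cons]
    cases h : PySem.Str.strIsdigit x with
    | true => simp [ih]
    | false => simp [ih]

theorem removeNumbersLoopA_eq (xs : List String) (i : Nat) :
    removeNumbersLoopA xs i = xs.take i ++ (xs.drop i).filter (fun s => !PySem.Str.strIsdigit s) := by
  induction xs, i using removeNumbersLoopA.induct with
  | case1 xs i h hd ih =>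
    rw [removeNumbersLoopA]
    simp only [h, dif_pos, hd, if_pos]
    rw [ih]
    have hlen : i ≤ (xs.take i).length := by simp [Nat.le_of_lt h]
    have htake : (xs.eraseIdx i).take i = xs.take i := by
      rw [List.eraseIdx_eq_take_drop_succ, List.take_append_of_le_length hlen, List.take_take]
      simp
    have hdrop : (xs.eraseIdx i).drop i = xs.drop (i + 1) := by
      rw [List.eraseIdx_eq_take_drop_succ, List.drop_append_of_le_length hlen]
      simp
    rw [htake, hdrop]
    rw [List.drop_eq_getElem_cons h, List.filter_cons_of_neg (by simp only [hd]; simp)]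
  | case2 xs i h hd ih =>
    rw [removeNumbersLoopA]
    simp only [h, dif_pos, hd, if_neg, Bool.false_eq_true, not_false_iff]
    rw [ih]
    rw [List.drop_eq_getElem_cons h,
      List.filter_cons_of_pos (by simp only [Bool.not_eq_true] at hd; simp only [hd]; simp)]
    have ht : xs.take (i + 1) = xs.take i ++ [xs[i]] := by
      rw [List.take_add_one, List.getElem?_eq_getElem h]
      rfl
    rw [ht, List.append_assoc]
    rfl
  | case3 xs i h =>
    rw [removeNumbersLoopA]
    simp only [h]
    have : xs.length ≤ i := Nat.le_of_not_lt h
    simp [List.drop_eq_nil_of_le this, List.take_of_length_le this]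

-- ===== VERDICT (by name: the statement is the Claim_ definition above) =====
theorem remove_numbers_spec : Claim_equal_remove_numbers := by
  intro list1 _
  unfold Spec_remove_numbers remove_numbers remove_numbers_alt
  rw [removeNumbersLoopA_eq, removeNumbersLoopB_eq]
  simp
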